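-- pv_equiv track=rewrite | github.com/Kirushikesh/openenv-pyre | examples/train_rl_agent.py | expand_difficulty_schedule
-- ===== SOURCE A (Python) =====
-- from typing import Dict, Iterable, List, Sequence
--
-- DIFFICULTIES = ("easy", "medium", "hard")
--
-- def expand_difficulty_schedule(schedule_text: str, episodes: int) -> List[str]:
--     stages = [part.strip().lower() for part in schedule_text.split(",") if part.strip()]
--     if not stages:
--         stages = ["medium"]
--     for stage in stages:
--         if stage not in DIFFICULTIES:
--             raise ValueError(f"Invalid difficulty in schedule: {stage}")
--     segment = max(1, episodes // len(stages))
--     expanded: List[str] = []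
--     for stage in stages:
--         expanded.extend([stage] * segment)
--     while len(expanded) < episodes:
--         expanded.append(stages[-1])
--     return expanded[:episodes]
-- ===== SOURCE B (Python) =====
-- from typing import List
--
-- DIFFICULTIES = ("easy", "medium", "hard")
--
-- def expand_difficulty_schedule(schedule_text: str, episodes: int) -> List[str]:
--     stages = [part.strip().lower() for part in schedule_text.split(",") if part.strip()]
--     if not stages:
--         stages = ["medium"]
--     for stage in stages:
--         if stage not in DIFFICULTIES:
--             raise ValueError(f"Invalid difficulty in schedule: {stage}")
--     segment = max(1, episodes // len(stages))
--     total = max(len(stages) * segment, episodes)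
--     expanded = [stages[min(i // segment, len(stages) - 1)] for i in range(total)]
--     return expanded[:episodes]
-- ===== Notes on version B (the rewrite author's own statement) =====
-- stated objective: simpler
-- what changed: The block-extend loop over stages plus the pad-while loop are replaced by a single position-driven comprehension stages[min(i // segment, len(stages) - 1)] over range(max(len(stages)*segment, episodes)), then the same final slice.
import Mathlib
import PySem

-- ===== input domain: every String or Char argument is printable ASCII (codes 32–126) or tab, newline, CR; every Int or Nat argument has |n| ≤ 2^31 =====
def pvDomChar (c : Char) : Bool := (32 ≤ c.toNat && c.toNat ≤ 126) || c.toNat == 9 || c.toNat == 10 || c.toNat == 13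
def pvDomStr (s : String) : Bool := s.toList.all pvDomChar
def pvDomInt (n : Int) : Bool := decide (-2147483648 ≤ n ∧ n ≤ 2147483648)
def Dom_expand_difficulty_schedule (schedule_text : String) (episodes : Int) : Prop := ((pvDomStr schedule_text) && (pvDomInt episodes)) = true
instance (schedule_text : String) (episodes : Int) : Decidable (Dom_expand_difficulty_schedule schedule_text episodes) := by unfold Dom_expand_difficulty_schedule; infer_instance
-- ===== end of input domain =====

-- B replaces A's block-extend loop followed by a pad-while loop with a single
-- position-driven construction indexed by i // segment (clamped to the last stage); same final slice.

-- Shared parsing (the identical first lines of both Pythons):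
-- stages = [part.strip().lower() for part in schedule_text.split(",") if part.strip()]; if not stages: stages = ["medium"]
def pvStages (schedule_text : String) : List String :=
  let stages :=
    (((PySem.Str.split? schedule_text ",").getD []).filter
        (fun part => PySem.Str.strip part != "")).map
      (fun part => PySem.Str.lower (PySem.Str.strip part))
  if stages = [] then ["medium"] else stages

-- ===== PORT A =====
-- while len(expanded) < episodes: expanded.append(last)
def pvPad (expanded : List String) (episodes : Int) (last : String) : List String :=
  if (expanded.length : Int) < episodes then pvPad (expanded ++ [last]) episodes last
  else expanded
termination_by (episodes - expanded.length).toNat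
decreasing_by simp at *; omega

-- The validation loop only raises ValueError (Pre_ excludes those inputs); it computes nothing.
def expand_difficulty_schedule (schedule_text : String) (episodes : Int) : List String :=
  let stages := pvStages schedule_text
  let segment : Int := max 1 (PySem.Int.floordiv episodes stages.length)
  let expanded := stages.foldl (fun acc stage => acc ++ List.replicate segment.toNat stage) []
  let expanded := pvPad expanded episodes (PySem.List.pyGetD stages (-1) "medium")
  PySem.List.slice expanded none (some episodes)

-- ===== PORT B =====
def expand_difficulty_schedule_alt (schedule_text : String) (episodes : Int) : List String :=
  let stages := pvStages schedule_text
  let segment : Int := max 1 (PySem.Int.floordiv episodes stages.length)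
  let total : Int := max ((stages.length : Int) * segment) episodes
  let expanded := (PySem.List.pyRange 0 total 1).map
    (fun i => PySem.List.pyGetD stages (min (PySem.Int.floordiv i segment) ((stages.length : Int) - 1)) "medium")
  PySem.List.slice expanded none (some episodes)

-- ===== PRECONDITION & SPEC =====
-- Pre_ excludes exactly the inputs where A raises ValueError: a parsed stage outside DIFFICULTIES.
def Pre_expand_difficulty_schedule (schedule_text : String) (episodes : Int) : Prop :=
  ∀ stage ∈ pvStages schedule_text, stage = "easy" ∨ stage = "medium" ∨ stage = "hard"
instance (schedule_text : String) (episodes : Int) : Decidable (Pre_expand_difficulty_schedule schedule_text episodes) := by unfold Pre_expand_difficulty_schedule; infer_instance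
def pvWitness_expand_difficulty_schedule : String × Int := ("easy, HARD", 5)

def Spec_expand_difficulty_schedule (schedule_text : String) (episodes : Int) (out : List String) : Prop := out = expand_difficulty_schedule_alt schedule_text episodes
instance (schedule_text : String) (episodes : Int) (out : List String) : Decidable (Spec_expand_difficulty_schedule schedule_text episodes out) := by unfold Spec_expand_difficulty_schedule; infer_instance

-- ===== CLAIM (what is proved, stated in full; the proofs are below) =====
def Claim_equal_expand_difficulty_schedule : Prop := ∀ (schedule_text : String) (episodes : Int), Dom_expand_difficulty_schedule schedule_text episodes → Pre_expand_difficulty_schedule schedule_text episodes → Spec_expand_difficulty_schedule schedule_text episodes (expand_difficulty_schedule schedule_text episodes)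

-- ===== LEMMAS AND PROOFS =====

theorem pvStages_ne_nil (schedule_text : String) : pvStages schedule_text ≠ [] := by
  simp only [pvStages]
  split
  · simp
  · assumption

-- pvPad appends exactly the missing copies of `last`.
theorem pvPad_eq_aux (episodes : Int) (last : String) :
    ∀ (fuel : Nat) (xs : List String), (episodes - (xs.length : Int)).toNat = fuel →
      pvPad xs episodes last = xs ++ List.replicate fuel last := by
  intro fuel
  induction fuel with
  | zero =>
    intro xs hf
    rw [pvPad, if_neg (by omega)]
    simp
  | succ n ih =>
    intro xs hf
    rw [pvPad, if_pos (by omega)]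
    rw [ih (xs ++ [last]) (by simp; omega)]
    simp [List.replicate_succ]

theorem pvPad_eq (expanded : List String) (episodes : Int) (last : String) :
    pvPad expanded episodes last
      = expanded ++ List.replicate (episodes - (expanded.length : Int)).toNat last :=
  pvPad_eq_aux episodes last _ expanded rfl

theorem map_range_const {α : Type} (m : Nat) (s : α) :
    (List.range m).map (fun _ => s) = List.replicate m s := by
  induction m with
  | zero => simp
  | succ n ih => rw [List.range_succ]; simp [ih, List.replicate_succ']

-- Main combinatorial fact: the clamped-index comprehension equals block replication plus last-stage padding.
theorem pv_main (d : String) (stages : List String) (h : stages ≠ []) (k e : Nat) (hk : 0 < k) :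
    (List.range (stages.length * k + e)).map
        (fun j => stages.getD (min (j / k) (stages.length - 1)) d)
      = stages.flatMap (fun s => List.replicate k s) ++ List.replicate e (stages.getLast h) := by
  induction stages generalizing e with
  | nil => exact absurd rfl h
  | cons s t ih =>
    by_cases htne : t = []
    · subst htne
      have hc : ∀ j ∈ List.range ([s].length * k + e),
          ([s].getD (min (j / k) ([s].length - 1)) d) = s := by
        intro j _; simp
      rw [List.map_congr_left hc, map_range_const,
        show [s].length * k + e = k + e by simp, List.replicate_add]
      simp
    · have htlen : 1 ≤ t.length := List.length_pos_iff.mpr htne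
      have hlen : (s :: t).length * k + e = k + (t.length * k + e) := by
        simp [List.length_cons]; ring
      rw [hlen, List.range_add, List.map_append]
      have h1 : (List.range k).map (fun j => (s :: t).getD (min (j / k) ((s :: t).length - 1)) d)
          = List.replicate k s := by
        have hc : ∀ j ∈ List.range k, ((s :: t).getD (min (j / k) ((s :: t).length - 1)) d) = s := by
          intro j hj
          rw [List.mem_range] at hj
          have : j / k = 0 := Nat.div_eq_of_lt hj
          simp [this]
        rw [List.map_congr_left hc, map_range_const]
      have h2 : (List.map (fun x => k + x) (List.range (t.length * k + e))).map
            (fun j => (s :: t).getD (min (j / k) ((s :: t).length - 1)) d)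
          = t.flatMap (fun x => List.replicate k x) ++ List.replicate e (t.getLast htne) := by
        rw [List.map_map]
        have heq : ∀ j ∈ List.range (t.length * k + e),
            ((fun j => (s :: t).getD (min (j / k) ((s :: t).length - 1)) d) ∘ (fun x => k + x)) j
              = t.getD (min (j / k) (t.length - 1)) d := by
          intro j _
          simp only [Function.comp]
          have hdiv : (k + j) / k = j / k + 1 := by
            rw [Nat.add_comm, Nat.add_div_right _ hk]
          have hmin : min ((k + j) / k) ((s :: t).length - 1) = min (j / k) (t.length - 1) + 1 := by
            rw [hdiv]; simp [List.length_cons]; omega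
          rw [hmin]
          simp
        rw [List.map_congr_left heq, ih htne e]
      rw [h1, h2, List.flatMap_cons, List.append_assoc, List.getLast_cons htne]

theorem expand_eq (schedule_text : String) (episodes : Int) :
    expand_difficulty_schedule schedule_text episodes
      = expand_difficulty_schedule_alt schedule_text episodes := by
  simp only [expand_difficulty_schedule, expand_difficulty_schedule_alt]
  set stages := pvStages schedule_text with hst
  have hne : stages ≠ [] := pvStages_ne_nil schedule_text
  have hn : 0 < stages.length := List.length_pos_iff.mpr hne
  set segment : Int := max 1 (PySem.Int.floordiv episodes stages.length) with hseg
  have hseg1 : 1 ≤ segment := le_max_left _ _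
  set k : Nat := segment.toNat with hk
  have hkpos : 0 < k := by omega
  have hsegk : segment = (k : Int) := by omega
  set e : Nat := (episodes - ((stages.length * k : Nat) : Int)).toNat with he
  -- A's pre-pad list is block replication
  have hfold : stages.foldl (fun acc stage => acc ++ List.replicate segment.toNat stage) []
      = stages.flatMap (fun s => List.replicate k s) := by
    rw [PySem.List.foldl_append_eq_flatMap]
    simp [hk]
  have hflen : (stages.flatMap (fun s => List.replicate k s)).length
      = stages.length * k := by
    rw [List.length_flatMap]
    simp [List.map_const']
  have hA : pvPad (stages.foldl (fun acc stage => acc ++ List.replicate segment.toNat stage) [])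
        episodes (PySem.List.pyGetD stages (-1) "medium")
      = stages.flatMap (fun s => List.replicate k s) ++ List.replicate e (stages.getLast hne) := by
    rw [hfold, PySem.List.pyGetD_neg_one stages "medium" hne, pvPad_eq, hflen]
  -- B side
  set total : Int := max ((stages.length : Int) * segment) episodes with htot
  have htotnat : (total - 0).toNat = stages.length * k + e := by
    have h1 : ((stages.length : Int) * segment) = ((stages.length * k : Nat) : Int) := by
      rw [hsegk]; push_cast; ring
    have hpos : 1 ≤ stages.length * k := Nat.one_le_iff_ne_zero.mpr (by positivity)
    rw [htot, h1]
    omega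
  have hB : (PySem.List.pyRange 0 total 1).map
        (fun i => PySem.List.pyGetD stages (min (PySem.Int.floordiv i segment) ((stages.length : Int) - 1)) "medium")
      = stages.flatMap (fun s => List.replicate k s) ++ List.replicate e (stages.getLast hne) := by
    rw [PySem.List.pyRange_one, List.map_map]
    simp only [Function.comp_def, zero_add]
    have hcg : ∀ j ∈ List.range ((total - 0).toNat),
        PySem.List.pyGetD stages (min (PySem.Int.floordiv (j : Int) segment) ((stages.length : Int) - 1)) "medium"
          = stages.getD (min (j / k) (stages.length - 1)) "medium" := by
      intro j _
      rw [hsegk, PySem.Int.floordiv_natCast j k]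
      have hmin : min ((j / k : Nat) : Int) ((stages.length : Int) - 1)
          = (((min (j / k) (stages.length - 1)) : Nat) : Int) := by
        push_cast
        omega
      rw [hmin, PySem.List.pyGetD_natCast]
    rw [List.map_congr_left hcg, htotnat]
    exact pv_main "medium" stages hne k e hkpos
  rw [hA, hB]

-- ===== VERDICT (by name: the statement is the Claim_ definition above) =====
theorem expand_difficulty_schedule_spec : Claim_equal_expand_difficulty_schedule := by
  intro schedule_text episodes _ _
  unfold Spec_expand_difficulty_schedule
  exact expand_eq schedule_text episodes
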